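-- pv_equiv track=rewrite | github.com/imml3457/mac-extension | extension.py | sha1pad
-- ===== SOURCE A (Python) =====
-- def sha1pad(data, bytelength = 0):
--     bytes = ""
--     i = 0
--     for n in range(len(data)):
--         #formatting data into byte array
--         #formatted as bits
--         bytes+='{0:08b}'.format(ord(data[n]))
--
--     #adding final bit
--     #which starts the 1 for padding
--     bits = bytes+"1"
--     padBits = bits
--     #getting how many 0's for padding
--     while len(padBits)%512 != 448:
--         padBits+="0"
--         i += 1
--     #append the original length to the end
--     if bytelength != 0:
--         padBits+='{0:064b}'.format((len(bits)-1) + bytelength+512)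
--     else:
--         padBits+='{0:064b}'.format((len(bits)-1))
--     return padBits
-- ===== SOURCE B (Python) =====
-- def sha1pad(data, bytelength = 0):
--     # big-integer formulation: pack the characters into one integer, set the
--     # trailing one bit and the zero run arithmetically (a left shift), and emit
--     # the whole padded block with a single zero-padded binary format
--     n = len(data)
--     msg = int.from_bytes(data.encode(), 'big')
--     k = (447 - 8 * n) % 512
--     body = format((msg * 2 + 1) << k, '0%db' % (8 * n + 1 + k))
--     tail = 8 * n + (bytelength + 512 if bytelength != 0 else 0)
--     return body + format(tail, '064b')
-- ===== Notes on version B (the rewrite author's own statement) =====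
-- stated objective: faster
-- what changed: B packs the characters into one big integer (int.from_bytes), sets the trailing one bit and the zero run arithmetically with a left shift by (447-8n)%512, and emits the whole padded block with a single zero-padded binary format, instead of A's per-character string concatenation and a while loop appending zeros one at a time.
import Mathlib
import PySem

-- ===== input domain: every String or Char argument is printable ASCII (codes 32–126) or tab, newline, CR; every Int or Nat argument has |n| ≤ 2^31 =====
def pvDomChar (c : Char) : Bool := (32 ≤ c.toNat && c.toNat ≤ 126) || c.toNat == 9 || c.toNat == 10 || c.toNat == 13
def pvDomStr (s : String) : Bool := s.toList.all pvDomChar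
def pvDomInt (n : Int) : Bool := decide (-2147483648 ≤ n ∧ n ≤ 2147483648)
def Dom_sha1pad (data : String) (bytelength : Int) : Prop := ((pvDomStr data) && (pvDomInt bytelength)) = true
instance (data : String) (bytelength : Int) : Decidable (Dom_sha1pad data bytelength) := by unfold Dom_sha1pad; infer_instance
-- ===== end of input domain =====

-- B packs the characters into one big integer and emits the padded block with a single
-- zero-padded binary format, instead of A's per-character string concatenation and its
-- zero-appending while loop (objective: faster, in a timing run's measurement).

-- shared helper: Python's format(n, '0Wb') — binary digits zero-padded to width W, sign first for negatives
def pyFmtBin (w : Nat) (n : Int) : List Char :=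
  if n < 0 then
    '-' :: (List.replicate (w - ((PySem.Int.toBinChars (-n)).length + 1)) '0' ++ PySem.Int.toBinChars (-n))
  else
    List.replicate (w - (PySem.Int.toBinChars n).length) '0' ++ PySem.Int.toBinChars n

-- ===== PORT A =====
-- the while loop: append '0' until len % 512 == 448 (fuel 512 is never exhausted: the loop runs < 512 steps)
def sha1padLoop : Nat → List Char → List Char
  | 0, s => s
  | f+1, s => if s.length % 512 ≠ 448 then sha1padLoop f (s ++ ['0']) else s

def sha1pad (data : String) (bytelength : Int) : String :=
  let cs := data.toList
  let bytes := (List.range cs.length).foldl (fun acc n => acc ++ pyFmtBin 8 ((cs.getD n ' ').toNat : Int)) []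
  let bits := bytes ++ ['1']
  let padBits := sha1padLoop 512 bits
  if bytelength ≠ 0 then
    String.ofList (padBits ++ pyFmtBin 64 (((bits.length : Int) - 1) + bytelength + 512))
  else
    String.ofList (padBits ++ pyFmtBin 64 ((bits.length : Int) - 1))

-- ===== PORT B =====
def sha1pad_alt (data : String) (bytelength : Int) : String :=
  let n := data.toList.length
  -- int.from_bytes(data.encode(), 'big'): big-endian base-256 value of the character codes
  let msg := data.toList.foldl (fun m c => m * 256 + (c.toNat : Int)) 0
  let k := (PySem.Int.mod (447 - 8 * (n : Int)) 512).toNat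
  -- '(msg*2+1) << k' on a nonnegative int is (msg*2+1) * 2^k
  let body := pyFmtBin (8 * n + 1 + k) ((msg * 2 + 1) * 2 ^ k)
  let tail := 8 * (n : Int) + (if bytelength ≠ 0 then bytelength + 512 else 0)
  String.ofList (body ++ pyFmtBin 64 tail)

-- ===== PRECONDITION & SPEC =====
def Spec_sha1pad (data : String) (bytelength : Int) (out : String) : Prop := out = sha1pad_alt data bytelength
instance (data : String) (bytelength : Int) (out : String) : Decidable (Spec_sha1pad data bytelength out) := by unfold Spec_sha1pad; infer_instance

-- ===== CLAIM (what is proved, stated in full; the proofs are below) =====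
def Claim_equal_sha1pad : Prop := ∀ (data : String) (bytelength : Int), Dom_sha1pad data bytelength → Spec_sha1pad data bytelength (sha1pad data bytelength)

-- ===== LEMMAS AND PROOFS =====

-- binary digits of a Nat, zero-padded to width w (format(x, '0wb') for x ≥ 0)
def padN (w x : Nat) : List Char :=
  List.replicate (w - (Nat.toDigits 2 x).length) '0' ++ Nat.toDigits 2 x

lemma pyFmtBin_nonneg (w : Nat) (x : Int) (hx : 0 ≤ x) : pyFmtBin w x = padN w x.toNat := by
  simp [pyFmtBin, PySem.Int.toBinChars, padN, not_lt.mpr hx]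

lemma tdc_acc (b : Nat) : ∀ (f n : Nat) (ds : List Char),
    Nat.toDigitsCore b f n ds = Nat.toDigitsCore b f n [] ++ ds := by
  intro f
  induction f with
  | zero => intro n ds; simp [Nat.toDigitsCore]
  | succ f ih =>
    intro n ds
    simp only [Nat.toDigitsCore]
    by_cases h : n / b = 0
    · simp [h]
    · simp only [h, if_false]
      rw [ih (n / b) ((n % b).digitChar :: ds), ih (n / b) [(n % b).digitChar]]
      simp

lemma tdc_fuel : ∀ (f f' n : Nat), n < f → n < f' →
    Nat.toDigitsCore 2 f n [] = Nat.toDigitsCore 2 f' n [] := by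
  intro f
  induction f with
  | zero => intro f' n h; omega
  | succ f ih =>
    intro f' n h h'
    cases f' with
    | zero => omega
    | succ f' =>
      simp only [Nat.toDigitsCore]
      by_cases h0 : n / 2 = 0
      · simp [h0]
      · simp only [h0, if_false]
        rw [tdc_acc, tdc_acc 2 f']
        rw [ih f' (n / 2) (by omega) (by omega)]

lemma tb_rec (n : Nat) (h : 2 ≤ n) :
    Nat.toDigits 2 n = Nat.toDigits 2 (n / 2) ++ [Nat.digitChar (n % 2)] := by
  have h0 : n / 2 ≠ 0 := by omega
  have step : ∀ (f m : Nat) (ds : List Char), Nat.toDigitsCore 2 (f + 1) m ds =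
      if m / 2 = 0 then (m % 2).digitChar :: ds
      else Nat.toDigitsCore 2 f (m / 2) ((m % 2).digitChar :: ds) := fun f m ds => rfl
  unfold Nat.toDigits
  rw [step n n [], if_neg h0, tdc_acc]
  rw [tdc_fuel n (n / 2 + 1) (n / 2) (by omega) (by omega)]

lemma tb_len_le (w x : Nat) (hw : 0 < w) (hx : x < 2 ^ w) : (Nat.toDigits 2 x).length ≤ w :=
  Nat.toDigits_length 2 x w hw hx

lemma padN_len (w y : Nat) (hw : 0 < w) (hy : y < 2 ^ w) : (padN w y).length = w := by
  have := tb_len_le w y hw hy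
  simp [padN]
  omega

lemma padN_zero (u : Nat) (hu : 0 < u) : padN u 0 = List.replicate u '0' := by
  have h : Nat.toDigits 2 0 = ['0'] := rfl
  rw [padN, h]
  cases u with
  | zero => omega
  | succ u => simp [List.replicate_succ']

lemma pad_split (w y : Nat) (hw : 1 ≤ w) (hy : y < 2 ^ (w + 1)) :
    padN (w + 1) y = padN w (y / 2) ++ [Nat.digitChar (y % 2)] := by
  by_cases h2 : 2 ≤ y
  · have hrec := tb_rec y h2
    have hl : (Nat.toDigits 2 y).length = (Nat.toDigits 2 (y / 2)).length + 1 := by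
      rw [hrec]; simp
    rw [padN, padN, hrec]
    have hlen : (Nat.toDigits 2 (y / 2) ++ [(y % 2).digitChar]).length =
        (Nat.toDigits 2 (y / 2)).length + 1 := by simp
    rw [hlen]
    have : w + 1 - ((Nat.toDigits 2 (y / 2)).length + 1) = w - (Nat.toDigits 2 (y / 2)).length := by
      omega
    rw [this, List.append_assoc]
  · interval_cases y
    · rw [show (0:Nat)/2 = 0 from rfl, show (0:Nat)%2 = 0 from rfl, padN_zero (w+1) (by omega),
        padN_zero w (by omega)]
      simp [Nat.digitChar, List.replicate_succ']
    · rw [show (1:Nat)/2 = 0 from rfl, padN_zero w (by omega)]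
      have h1 : Nat.toDigits 2 1 = ['1'] := rfl
      rw [padN, h1]
      simp [Nat.digitChar]

lemma Z1 : ∀ (w : Nat), 1 ≤ w → ∀ (a y : Nat), 0 < a → y < 2 ^ w →
    Nat.toDigits 2 (a * 2 ^ w + y) = Nat.toDigits 2 a ++ padN w y := by
  intro w
  induction w with
  | zero => omega
  | succ w ih =>
    intro _ a y ha hy
    by_cases hw : w = 0
    · subst hw
      have h2 : 2 ≤ a * 2 ^ 1 + y := by
        have : 1 ≤ a := ha
        omega
      rw [tb_rec _ h2]
      have hdiv : (a * 2 ^ 1 + y) / 2 = a := by omega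
      have hmod : (a * 2 ^ 1 + y) % 2 = y := by omega
      rw [hdiv, hmod]
      congr 1
      interval_cases y <;> rfl
    · have hw1 : 1 ≤ w := by omega
      have h2 : 2 ≤ a * 2 ^ (w + 1) + y := by
        have h1 : 1 ≤ a := ha
        have : 2 ^ (w + 1) ≥ 2 := by
          calc 2 ^ (w + 1) ≥ 2 ^ 1 := Nat.pow_le_pow_right (by omega) (by omega)
          _ = 2 := rfl
        nlinarith
      rw [tb_rec _ h2]
      have hpow : (2 : Nat) ^ (w + 1) = 2 ^ w * 2 := by ring
      have hmul : a * 2 ^ (w + 1) = (a * 2 ^ w) * 2 := by rw [hpow]; ring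
      have hdiv : (a * 2 ^ (w + 1) + y) / 2 = a * 2 ^ w + y / 2 := by
        rw [hmul]
        omega
      have hmod : (a * 2 ^ (w + 1) + y) % 2 = y % 2 := by
        rw [hmul]
        omega
      rw [hdiv, hmod, ih hw1 a (y / 2) ha (by rw [hpow] at hy; omega)]
      rw [pad_split w y hw1 hy, List.append_assoc]

lemma padP (u w x y : Nat) (hu : 1 ≤ u) (hw : 1 ≤ w) (hx : x < 2 ^ u) (hy : y < 2 ^ w) :
    padN (u + w) (x * 2 ^ w + y) = padN u x ++ padN w y := by
  by_cases hx0 : x = 0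
  · subst hx0
    simp only [Nat.zero_mul, Nat.zero_add]
    rw [padN_zero u hu]
    by_cases hy0 : y = 0
    · subst hy0
      rw [padN_zero w hw, padN_zero (u + w) (by omega), ← List.replicate_add]
    · have hly : (Nat.toDigits 2 y).length ≤ w := tb_len_le w y hw hy
      rw [padN, padN]
      have : u + w - (Nat.toDigits 2 y).length = u + (w - (Nat.toDigits 2 y).length) := by omega
      rw [this, List.replicate_add, List.append_assoc]
  · have hx' : 0 < x := Nat.pos_of_ne_zero hx0
    rw [padN, padN, Z1 w hw x y hx' hy]
    have hlx : (Nat.toDigits 2 x).length ≤ u := tb_len_le u x hu hx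
    have hlp : (padN w y).length = w := padN_len w y hw hy
    have hlen : (Nat.toDigits 2 x ++ padN w y).length = (Nat.toDigits 2 x).length + w := by
      simp [hlp]
    rw [hlen]
    have : u + w - ((Nat.toDigits 2 x).length + w) = u - (Nat.toDigits 2 x).length := by omega
    rw [this, List.append_assoc]

def msgN (cs : List Char) : Nat := cs.foldl (fun m c => m * 256 + c.toNat) 0

lemma msgN_append (cs : List Char) (c : Char) :
    msgN (cs ++ [c]) = msgN cs * 256 + c.toNat := by
  simp [msgN, List.foldl_append]

lemma msgN_lt (cs : List Char) (h : ∀ c ∈ cs, c.toNat < 256) :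
    msgN cs < 2 ^ (8 * cs.length) := by
  induction cs using List.reverseRecOn with
  | nil => norm_num [msgN]
  | append_singleton l a ih =>
    rw [msgN_append]
    have hl := ih (fun c hc => h c (List.mem_append_left _ hc))
    have ha : a.toNat < 256 := h a (List.mem_append_right _ (List.mem_singleton_self a))
    have hlen : 8 * (l ++ [a]).length = 8 * l.length + 8 := by simp; ring
    rw [hlen, pow_add]
    have : (2 : Nat) ^ 8 = 256 := rfl
    rw [this]
    nlinarith [hl, ha]

lemma T (cs : List Char) (hne : cs ≠ []) (h : ∀ c ∈ cs, c.toNat < 256) :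
    padN (8 * cs.length) (msgN cs) = (cs.map (fun c => padN 8 c.toNat)).flatten := by
  induction cs using List.reverseRecOn with
  | nil => simp at hne
  | append_singleton l a ih =>
    have ha : a.toNat < 256 := h a (List.mem_append_right _ (List.mem_singleton_self a))
    have hl : ∀ c ∈ l, c.toNat < 256 := fun c hc => h c (List.mem_append_left _ hc)
    by_cases hl0 : l = []
    · subst hl0
      simp [msgN]
    · have hlen : 8 * (l ++ [a]).length = 8 * l.length + 8 := by simp; ring
      rw [msgN_append, hlen]
      have h256 : (256 : Nat) = 2 ^ 8 := rfl
      rw [show msgN l * 256 + a.toNat = msgN l * 2 ^ 8 + a.toNat by rw [h256]]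
      rw [padP (8 * l.length) 8 (msgN l) a.toNat
        (by have := List.length_pos_iff.mpr hl0; omega) (by omega)
        (msgN_lt l hl) (by omega)]
      rw [ih hl0 hl]
      simp

lemma S (cs : List Char) (h : ∀ c ∈ cs, c.toNat < 256) :
    padN (8 * cs.length + 1) (2 * msgN cs + 1) =
      (cs.map (fun c => padN 8 c.toNat)).flatten ++ ['1'] := by
  by_cases h0 : cs = []
  · subst h0
    simp [msgN]
    rfl
  · rw [show 2 * msgN cs + 1 = msgN cs * 2 ^ 1 + 1 by ring]
    rw [padP (8 * cs.length) 1 (msgN cs) 1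
      (by have := List.length_pos_iff.mpr h0; omega) (by omega)
      (msgN_lt cs h) (by omega)]
    rw [T cs h0 h]
    rfl

lemma flat_len (cs : List Char) (h : ∀ c ∈ cs, c.toNat < 256) :
    ((cs.map (fun c => padN 8 c.toNat)).flatten).length = 8 * cs.length := by
  induction cs with
  | nil => simp
  | cons c cs ih =>
    simp only [List.map_cons, List.flatten_cons, List.length_append, List.length_cons]
    rw [padN_len 8 c.toNat (by omega) (h c List.mem_cons_self),
      ih (fun x hx => h x (List.mem_cons_of_mem c hx))]
    ring

lemma foldl_int_nat (cs : List Char) : ∀ (a : Nat),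
    cs.foldl (fun (m : Int) c => m * 256 + (c.toNat : Int)) (a : Int) =
      ((cs.foldl (fun (m : Nat) c => m * 256 + c.toNat) a : Nat) : Int) := by
  induction cs with
  | nil => simp
  | cons c cs ih =>
    intro a
    simp only [List.foldl_cons]
    rw [show (a : Int) * 256 + (c.toNat : Int) = ((a * 256 + c.toNat : Nat) : Int) by push_cast; ring]
    rw [ih (a * 256 + c.toNat)]

-- A's indexed foldl over range(len) builds exactly the flattened per-char map
lemma bytes_eq (cs : List Char) :
    (List.range cs.length).foldl (fun acc n => acc ++ pyFmtBin 8 (((cs.getD n ' ').toNat : Nat) : Int)) [] =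
    (cs.map (fun c => padN 8 c.toNat)).flatten := by
  have hmap : ∀ c : Char, pyFmtBin 8 ((c.toNat : Nat) : Int) = padN 8 c.toNat := by
    intro c
    rw [pyFmtBin_nonneg 8 _ (by positivity)]
    simp
  induction cs using List.reverseRecOn with
  | nil => simp
  | append_singleton l a ih =>
    rw [List.length_append, List.length_cons, List.length_nil, List.range_succ, List.foldl_append]
    have hc : (List.range l.length).foldl
        (fun acc n => acc ++ pyFmtBin 8 ((((l ++ [a]).getD n ' ').toNat : Nat) : Int)) [] =
        (List.range l.length).foldl
        (fun acc n => acc ++ pyFmtBin 8 (((l.getD n ' ').toNat : Nat) : Int)) [] := by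
      apply PySem.List.foldl_congr_mem
      intro acc n hn
      rw [List.mem_range] at hn
      rw [List.getD_append _ _ _ _ hn]
    rw [hc, ih]
    simp [List.flatten_append, hmap]

-- A's padding loop equals appending a closed-form zero run
set_option maxRecDepth 4096 in
lemma loop_eq (f : Nat) : ∀ (s : List Char),
    (PySem.Int.mod (448 - (s.length : Int)) 512).toNat ≤ f →
    sha1padLoop f s = s ++ List.replicate (PySem.Int.mod (448 - (s.length : Int)) 512).toNat '0' := by
  induction f with
  | zero =>
    intro s h
    have h0 : (PySem.Int.mod (448 - (s.length : Int)) 512).toNat = 0 := Nat.le_zero.mp h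
    rw [h0]
    simp [sha1padLoop]
  | succ f ih =>
    intro s h
    rw [PySem.Int.mod_eq_emod_of_pos (by norm_num)] at h ⊢
    have hlt : (448 - (s.length : Int)) % 512 < 512 := Int.emod_lt_of_pos _ (by norm_num)
    have hge : 0 ≤ (448 - (s.length : Int)) % 512 := Int.emod_nonneg _ (by norm_num)
    by_cases hc : s.length % 512 = 448
    · have h0 : (448 - (s.length : Int)) % 512 = 0 := by omega
      rw [h0]
      simp [sha1padLoop, hc]
    · have h1 : (448 - (s.length : Int)) % 512 ≠ 0 := by omega
      rw [sha1padLoop]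
      rw [if_pos hc]
      have := ih (s ++ ['0']) (by
        rw [PySem.Int.mod_eq_emod_of_pos (by norm_num)]
        simp only [List.length_append, List.length_cons, List.length_nil]
        push_cast
        omega)
      rw [this]
      rw [PySem.Int.mod_eq_emod_of_pos (by norm_num)]
      simp only [List.length_append, List.length_cons, List.length_nil]
      have hk : ((448 - ((s.length : Int) + 1)) % 512).toNat = ((448 - (s.length : Int)) % 512).toNat - 1 := by
        omega
      rw [List.append_assoc]
      congr 1
      push_cast
      rw [hk]
      have hK : ((448 - (s.length : Int)) % 512).toNat = (((448 - (s.length : Int)) % 512).toNat - 1) + 1 := by omega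
      conv_rhs => rw [hK, List.replicate_succ]
      simp

-- ===== VERDICT (by name: the statement is the Claim_ definition above) =====
theorem sha1pad_spec : Claim_equal_sha1pad := by
  intro data bytelength hdom
  have hcs : ∀ c ∈ data.toList, c.toNat < 256 := by
    intro c hc
    unfold Dom_sha1pad pvDomStr pvDomChar at hdom
    simp only [Bool.and_eq_true, List.all_eq_true] at hdom
    have := hdom.1 c hc
    simp only [Bool.or_eq_true, Bool.and_eq_true, decide_eq_true_eq, beq_iff_eq] at this
    omega
  unfold Spec_sha1pad sha1pad sha1pad_alt
  simp only []
  rw [bytes_eq]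
  set cs := data.toList with hcsdef
  set l := cs.length with hl
  set M := msgN cs with hM
  set F := (cs.map (fun c => padN 8 c.toNat)).flatten with hF
  have hmsg : cs.foldl (fun (m : Int) c => m * 256 + (c.toNat : Int)) 0 = (M : Int) := by
    have h0 : ((0 : Nat) : Int) = (0 : Int) := rfl
    rw [← h0, foldl_int_nat cs 0, hM, msgN]
  rw [hmsg]
  have hFlen : F.length = 8 * l := flat_len cs hcs
  have hbl : (F ++ ['1']).length = 8 * l + 1 := by simp [hFlen]
  set k := (PySem.Int.mod (447 - 8 * (l : Int)) 512).toNat with hk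
  have hkemod : PySem.Int.mod (447 - 8 * (l : Int)) 512 = (447 - 8 * (l : Int)) % 512 :=
    PySem.Int.mod_eq_emod_of_pos (by norm_num)
  have hk1 : 1 ≤ k := by rw [hk, hkemod]; omega
  have harg : (448 - (((F ++ ['1']).length : Nat) : Int)) = 447 - 8 * (l : Int) := by
    rw [hbl]; push_cast; ring
  have hloopn : (PySem.Int.mod (448 - (((F ++ ['1']).length : Nat) : Int)) 512).toNat = k := by
    rw [harg, ← hk]
  rw [loop_eq 512 (F ++ ['1']) (by rw [hloopn, hk, hkemod]; omega), hloopn]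
  have hbody : pyFmtBin (8 * l + 1 + k) (((M : Int) * 2 + 1) * 2 ^ k) =
      F ++ ['1'] ++ List.replicate k '0' := by
    rw [pyFmtBin_nonneg _ _ (by positivity)]
    rw [show ((M : Int) * 2 + 1) * 2 ^ k = (((2 * M + 1) * 2 ^ k : Nat) : Int) by push_cast; ring,
      Int.toNat_natCast]
    have hMlt : M < 2 ^ (8 * l) := msgN_lt cs hcs
    have hx : 2 * M + 1 < 2 ^ (8 * l + 1) := by rw [pow_succ]; omega
    have hP := padP (8 * l + 1) k (2 * M + 1) 0 (by omega) hk1 hx (by positivity)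
    rw [show (2 * M + 1) * 2 ^ k = (2 * M + 1) * 2 ^ k + 0 from rfl, hP,
      padN_zero k hk1, S cs hcs, ← hF, List.append_assoc]
  rw [hbody]
  have htail : ((((F ++ ['1']).length : Nat) : Int) - 1) = 8 * (l : Int) := by
    rw [hbl]; push_cast; ring
  by_cases hb : bytelength = 0
  · simp only [hb, ne_eq, not_true_eq_false, if_false]
    rw [htail, add_zero]
  · rw [if_pos hb, if_pos hb, htail]
    rw [show 8 * (l : Int) + bytelength + 512 = 8 * (l : Int) + (bytelength + 512) by ring]
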